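-- pv_equiv track=rewrite | github.com/uiYzzi/manga_ner | src/train.py | process_conll_data
-- ===== SOURCE A (Python) =====
-- def process_conll_data(dataset):
--     docs = []
--     doc = ""
--     for line in dataset['text']:
--         if line.strip() == "" and doc.strip() != "":
--             docs.append(doc.strip())
--             doc = ""
--         elif "-DOCSTART-" in line:
--             if doc.strip() != "":
--                 docs.append(doc.strip())
--             doc = ""
--         else:
--             doc += line + '\n'
--     if doc.strip() != "":
--         docs.append(doc.strip())
--     return {"text": docs}
-- ===== SOURCE B (Python) =====
-- from itertools import groupby
--
-- def process_conll_data(dataset):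
--     def is_sep(line):
--         return line.strip() == "" or "-DOCSTART-" in line
--     docs = []
--     for sep, run in groupby(dataset['text'], key=is_sep):
--         if not sep:
--             text = ''.join(l + '\n' for l in run).strip()
--             if text:
--                 docs.append(text)
--     return {"text": docs}
-- ===== Notes on version B (the rewrite author's own statement) =====
-- stated objective: alternative
-- what changed: Replaced A's stateful doc-buffer string accumulator with itertools.groupby run-partitioning: lines are split into maximal runs by a separator predicate (blank or -DOCSTART-) and each content run is joined and emitted, eliminating the mutable buffer state machine.
import Mathlib
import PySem

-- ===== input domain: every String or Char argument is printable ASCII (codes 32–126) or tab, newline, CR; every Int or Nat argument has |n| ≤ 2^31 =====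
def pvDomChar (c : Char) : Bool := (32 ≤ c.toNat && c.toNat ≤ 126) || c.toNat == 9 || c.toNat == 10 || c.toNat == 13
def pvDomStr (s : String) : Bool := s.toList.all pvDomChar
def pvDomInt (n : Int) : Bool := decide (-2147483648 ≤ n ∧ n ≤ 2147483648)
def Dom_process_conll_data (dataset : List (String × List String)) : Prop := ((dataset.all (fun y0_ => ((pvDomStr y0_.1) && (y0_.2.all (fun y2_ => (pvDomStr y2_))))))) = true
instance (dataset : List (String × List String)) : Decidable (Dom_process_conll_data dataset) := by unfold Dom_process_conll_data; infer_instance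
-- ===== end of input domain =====

-- B replaces A's doc-buffer state machine by partitioning the lines into maximal runs
-- (itertools.groupby on a separator predicate) and emitting each content run; objective: alternative decomposition, same cost.

-- ===== PORT A =====
-- for-loop body of A: state is (docs, doc)
def pvStepA (st : List String × String) (line : String) : List String × String :=
  if PySem.Str.strip line = "" ∧ PySem.Str.strip st.2 ≠ "" then
    (st.1 ++ [PySem.Str.strip st.2], "")
  else if PySem.Str.isIn "-DOCSTART-" line then
    ((if PySem.Str.strip st.2 ≠ "" then st.1 ++ [PySem.Str.strip st.2] else st.1), "")
  else
    (st.1, st.2 ++ line ++ "\n")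

def process_conll_data (dataset : List (String × List String)) : List (String × List String) :=
  match (PySem.Dict.mk dataset).get? "text" with
  | none => []   -- KeyError in Python: excluded by Pre_
  | some lines =>
    let st := lines.foldl pvStepA ([], "")
    [("text", if PySem.Str.strip st.2 ≠ "" then st.1 ++ [PySem.Str.strip st.2] else st.1)]

-- ===== PORT B =====
def pvIsSep (line : String) : Bool :=
  PySem.Str.strip line == "" || PySem.Str.isIn "-DOCSTART-" line

-- itertools.groupby(lines, key=pvIsSep): maximal runs of lines with equal key
def pvGroups (ls : List String) : List (Bool × List String) :=
  match ls with
  | [] => []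
  | l :: rest =>
    (pvIsSep l, l :: rest.takeWhile (fun x => pvIsSep x == pvIsSep l)) ::
      pvGroups (rest.dropWhile (fun x => pvIsSep x == pvIsSep l))
termination_by ls.length
decreasing_by
  exact Nat.lt_succ_of_le (List.length_dropWhile_le _ _)

-- loop body of B over the groups
def pvStepB (docs : List String) (g : Bool × List String) : List String :=
  if g.1 then docs
  else
    let text := PySem.Str.strip (PySem.Str.join "" (g.2.map (fun l => l ++ "\n")))
    if text ≠ "" then docs ++ [text] else docs

def process_conll_data_alt (dataset : List (String × List String)) : List (String × List String) :=
  match (PySem.Dict.mk dataset).get? "text" with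
  | none => []   -- KeyError in Python: excluded by Pre_
  | some lines => [("text", (pvGroups lines).foldl pvStepB [])]

-- ===== PRECONDITION & SPEC =====
-- Pre_ excludes exactly the dicts without a "text" key, on which Python raises KeyError.
def Pre_process_conll_data (dataset : List (String × List String)) : Prop :=
  (PySem.Dict.mk dataset).contains "text" = true
instance (dataset : List (String × List String)) : Decidable (Pre_process_conll_data dataset) := by
  unfold Pre_process_conll_data; infer_instance

def pvWitness_process_conll_data : (List (String × List String)) :=
  [("text", ["-DOCSTART- -X- O", "Tokyo B-LOC", "tower I-LOC", "", "Naruto B-PER"])]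

def Spec_process_conll_data (dataset : List (String × List String)) (out : List (String × List String)) : Prop := out = process_conll_data_alt dataset
instance (dataset : List (String × List String)) (out : List (String × List String)) : Decidable (Spec_process_conll_data dataset out) := by unfold Spec_process_conll_data; infer_instance

-- ===== CLAIM (what is proved, stated in full; the proofs are below) =====
def Claim_equal_process_conll_data : Prop := ∀ (dataset : List (String × List String)), Dom_process_conll_data dataset → Pre_process_conll_data dataset → Spec_process_conll_data dataset (process_conll_data dataset)

-- ===== LEMMAS AND PROOFS =====

-- A's buffer after the loop, as built by A: each line with a trailing newline
def pvJoinN (cs : List String) : String := cs.foldl (fun a c => a ++ c ++ "\n") ""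

-- A's post-loop flush
def pvFinish (st : List String × String) : List String :=
  if PySem.Str.strip st.2 ≠ "" then st.1 ++ [PySem.Str.strip st.2] else st.1

-- B's result on a list of lines
def pvBres (ls : List String) : List String := (pvGroups ls).foldl pvStepB []

lemma pvJoinN_toList_aux (cs : List String) : ∀ (a : String),
    (cs.foldl (fun a c => a ++ c ++ "\n") a).toList
      = a.toList ++ (cs.map (fun c => c.toList ++ ['\n'])).flatten := by
  induction cs with
  | nil => intro a; simp
  | cons c cs ih =>
    intro a
    simp [List.foldl_cons, ih]

lemma pvJoinN_toList (cs : List String) :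
    (pvJoinN cs).toList = (cs.map (fun c => c.toList ++ ['\n'])).flatten := by
  simpa using pvJoinN_toList_aux cs ""

lemma pvJoin_toList_aux (cs : List String) :
    PySem.Chars.join [] (cs.map (fun l => (l ++ "\n").toList))
      = (cs.map (fun c => c.toList ++ ['\n'])).flatten := by
  have hnl : ("\n" : String).toList = ['\n'] := by decide
  induction cs with
  | nil => simp [PySem.Chars.join_nil]
  | cons c cs ih =>
    cases cs with
    | nil => simp [PySem.Chars.join_singleton, String.toList_append, hnl]
    | cons d ds =>
      simp only [List.map_cons, String.toList_append, hnl] at ih ⊢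
      rw [PySem.Chars.join_cons_cons]
      simp [ih]

lemma pvJoin_toList (cs : List String) :
    (PySem.Str.join "" (cs.map (fun l => l ++ "\n"))).toList
      = (cs.map (fun c => c.toList ++ ['\n'])).flatten := by
  have h := pvJoin_toList_aux cs
  have hnl : ("\n" : String).toList = ['\n'] := by decide
  simpa [PySem.Str.toList_join, List.map_map, Function.comp_def, String.toList_append, hnl] using h

lemma pvStrip_of_all (cs : List Char) (h : cs.all PySem.Chars.isspace = true) :
    PySem.Chars.strip cs = [] := by
  have h1 : cs.dropWhile PySem.Chars.isspace = [] :=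
    List.dropWhile_eq_nil_iff.mpr (by simpa [List.all_eq_true] using h)
  simp [PySem.Chars.strip, PySem.Chars.lstrip, PySem.Chars.rstrip, h1]

lemma pvStrip_eq_nil (cs : List Char) (h : PySem.Chars.strip cs = []) :
    cs.all PySem.Chars.isspace = true := by
  induction cs with
  | nil => rfl
  | cons c cs ih =>
    by_cases hc : PySem.Chars.isspace c = true
    · have h' : PySem.Chars.strip cs = [] := by
        simpa [PySem.Chars.strip, PySem.Chars.lstrip, List.dropWhile_cons, hc] using h
      simp [hc, ih h']
    · exfalso
      have h2 : ((c :: cs).reverse.dropWhile PySem.Chars.isspace) = [] := by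
        have : PySem.Chars.strip (c :: cs) = [] := h
        simp [PySem.Chars.strip, PySem.Chars.lstrip, hc,
          PySem.Chars.rstrip] at this
        simpa using this
      have := List.dropWhile_eq_nil_iff.mp h2 c (by simp)
      exact hc this

lemma pvStrip_ws_append (W X : List Char) (h : W.all PySem.Chars.isspace = true) :
    PySem.Chars.strip (W ++ X) = PySem.Chars.strip X := by
  have hW : W.dropWhile PySem.Chars.isspace = [] :=
    List.dropWhile_eq_nil_iff.mpr (by simpa [List.all_eq_true] using h)
  simp [PySem.Chars.strip, PySem.Chars.lstrip, List.dropWhile_append, hW]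

-- the central identity: stripping A's buffer W ++ joinN cs (whitespace prefix W) is stripping B's joined run
lemma pvStrip_doc (W : String) (cs : List String)
    (hW : W.toList.all PySem.Chars.isspace = true) :
    PySem.Str.strip (W ++ pvJoinN cs)
      = PySem.Str.strip (PySem.Str.join "" (cs.map (fun l => l ++ "\n"))) := by
  rw [← String.toList_inj]
  simp only [PySem.Str.toList_strip, String.toList_append, pvJoinN_toList, pvJoin_toList]
  exact pvStrip_ws_append _ _ hW

lemma pvStrip_str_empty_iff (s : String) :
    PySem.Str.strip s = "" ↔ PySem.Chars.strip s.toList = [] := by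
  rw [← String.toList_inj]
  simp [PySem.Str.toList_strip]

-- strip (W ++ joinN []) = "" for whitespace W
lemma pvStrip_doc_nil (W : String) (hW : W.toList.all PySem.Chars.isspace = true) :
    PySem.Str.strip (W ++ pvJoinN []) = "" := by
  rw [pvStrip_str_empty_iff]
  apply pvStrip_of_all
  simp [String.toList_append, pvJoinN_toList, hW]

-- conversely: if the buffer strips to "" and cs holds only content lines, cs = []
lemma pvCs_nil (W : String) (cs : List String)
    (hall : ∀ c ∈ cs, pvIsSep c = false)
    (h : PySem.Str.strip (W ++ pvJoinN cs) = "") : cs = [] := by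
  cases cs with
  | nil => rfl
  | cons c cs' =>
    exfalso
    have hws : ((W ++ pvJoinN (c :: cs')).toList).all PySem.Chars.isspace = true :=
      pvStrip_eq_nil _ ((pvStrip_str_empty_iff _).mp h)
    have hcws : c.toList.all PySem.Chars.isspace = true := by
      rw [List.all_eq_true] at hws ⊢
      intro x hx
      apply hws
      simp only [String.toList_append, pvJoinN_toList, List.mem_append]
      right
      refine List.mem_flatten.mpr ⟨c.toList ++ ['\n'], by simp, by simp [hx]⟩
    have hstrip : PySem.Str.strip c = "" := by
      rw [pvStrip_str_empty_iff]; exact pvStrip_of_all _ hcws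
    have := hall c (by simp)
    simp [pvIsSep, hstrip] at this

lemma pvJoinN_append_one (cs : List String) (l : String) :
    pvJoinN (cs ++ [l]) = pvJoinN cs ++ l ++ "\n" := by
  simp [pvJoinN, List.foldl_append]

-- string append facts routed through toList
lemma pvStr_append_empty (s : String) : s ++ "" = s := by
  rw [← String.toList_inj]; simp

lemma pvStr_append_assoc (a b c : String) : a ++ b ++ c = a ++ (b ++ c) := by
  rw [← String.toList_inj]; simp

-- ---- A-side loop lemmas ----

lemma pvStepA_acc (doc : String) (l : String) (docs : List String) :
    pvStepA (docs, doc) l = (docs ++ (pvStepA ([], doc) l).1, (pvStepA ([], doc) l).2) := by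
  simp only [pvStepA]
  split_ifs <;> simp

lemma pvAloop_acc (ls : List String) : ∀ (docs : List String) (doc : String),
    ls.foldl pvStepA (docs, doc)
      = (docs ++ (ls.foldl pvStepA ([], doc)).1, (ls.foldl pvStepA ([], doc)).2) := by
  induction ls with
  | nil => intro docs doc; simp
  | cons l ls ih =>
    intro docs doc
    simp only [List.foldl_cons]
    rcases hE : pvStepA ([], doc) l with ⟨e, d'⟩
    rw [pvStepA_acc doc l docs]
    simp only [hE]
    rw [ih (docs ++ e) d', ih e d']
    simp

lemma pvFinish_acc (ls : List String) (docs : List String) (doc : String) :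
    pvFinish (ls.foldl pvStepA (docs, doc)) = docs ++ pvFinish (ls.foldl pvStepA ([], doc)) := by
  rw [pvAloop_acc]
  simp only [pvFinish]
  split_ifs <;> simp

-- ---- B-side group lemmas ----

lemma pvStepB_acc (docs : List String) (g : Bool × List String) :
    pvStepB docs g = docs ++ pvStepB [] g := by
  simp only [pvStepB]
  split_ifs <;> simp

lemma pvBfold_acc (gs : List (Bool × List String)) : ∀ (docs : List String),
    gs.foldl pvStepB docs = docs ++ gs.foldl pvStepB [] := by
  induction gs with
  | nil => intro docs; simp
  | cons g gs ih =>
    intro docs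
    simp only [List.foldl_cons]
    rw [pvStepB_acc docs g, ih (docs ++ pvStepB [] g), ih (pvStepB [] g)]
    simp

lemma pvGroups_cons (l : String) (ls : List String) :
    pvGroups (l :: ls)
      = (pvIsSep l, l :: ls.takeWhile (fun x => pvIsSep x == pvIsSep l)) ::
          pvGroups (ls.dropWhile (fun x => pvIsSep x == pvIsSep l)) := by
  rw [pvGroups]

lemma pvBres_true_group (l : String) (ls : List String) (h : pvIsSep l = true) :
    pvBres (l :: ls) = pvBres (ls.dropWhile (fun x => pvIsSep x == true)) := by
  simp only [pvBres, pvGroups_cons, h, List.foldl_cons]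
  have : pvStepB [] (true, l :: ls.takeWhile (fun x => pvIsSep x == true)) = [] := by
    simp [pvStepB]
  rw [this]

lemma pvBres_dropSep (ls : List String) :
    pvBres (ls.dropWhile (fun x => pvIsSep x == true)) = pvBres ls := by
  induction ls with
  | nil => rfl
  | cons l ls ih =>
    by_cases h : pvIsSep l = true
    · rw [List.dropWhile_cons]
      simp only [h, beq_self_eq_true, if_true]
      rw [pvBres_true_group l ls h]
    · rw [List.dropWhile_cons]
      simp [h]

lemma pvBres_sep_cons (l : String) (ls : List String) (h : pvIsSep l = true) :
    pvBres (l :: ls) = pvBres ls := by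
  rw [pvBres_true_group l ls h, pvBres_dropSep]

-- a nonempty content run followed by nothing or a separator forms one group
lemma pvGroups_content (c : String) (cs : List String) (rest : List String)
    (hc : pvIsSep c = false) (hall : ∀ x ∈ cs, pvIsSep x = false)
    (hrest : rest = [] ∨ ∃ l ls, rest = l :: ls ∧ pvIsSep l = true) :
    pvGroups ((c :: cs) ++ rest) = (false, c :: cs) :: pvGroups rest := by
  have htw : (cs ++ rest).takeWhile (fun x => !pvIsSep x) = cs := by
    have h1 : cs.takeWhile (fun x => !pvIsSep x) = cs :=
      List.takeWhile_eq_self_iff.mpr (by intro x hx; simp [hall x hx])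
    have h2 : rest.takeWhile (fun x => !pvIsSep x) = [] := by
      rcases hrest with h | ⟨l, ls, rfl, hl⟩
      · simp [h]
      · simp [hl]
    rw [List.takeWhile_append]
    simp [h1, h2]
  have hdw : (cs ++ rest).dropWhile (fun x => !pvIsSep x) = rest := by
    have h1 : cs.dropWhile (fun x => !pvIsSep x) = [] :=
      List.dropWhile_eq_nil_iff.mpr (by intro x hx; simp [hall x hx])
    have h2 : rest.dropWhile (fun x => !pvIsSep x) = rest := by
      rcases hrest with h | ⟨l, ls, rfl, hl⟩
      · simp [h]
      · simp [hl]
    rw [List.dropWhile_append]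
    simp [h1, h2]
  rw [List.cons_append, pvGroups_cons]
  simp [hc, htw, hdw]

lemma pvBres_content (c : String) (cs : List String) (rest : List String)
    (hc : pvIsSep c = false) (hall : ∀ x ∈ cs, pvIsSep x = false)
    (hrest : rest = [] ∨ ∃ l ls, rest = l :: ls ∧ pvIsSep l = true) :
    pvBres ((c :: cs) ++ rest) = pvStepB [] (false, c :: cs) ++ pvBres rest := by
  simp only [pvBres, pvGroups_content c cs rest hc hall hrest, List.foldl_cons]
  rw [pvBfold_acc]

-- the emitted document of a run, as A computes it
lemma pvEmit_eq (W : String) (cs : List String)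
    (hW : W.toList.all PySem.Chars.isspace = true) :
    pvStepB [] (false, cs)
      = (if PySem.Str.strip (W ++ pvJoinN cs) ≠ "" then [PySem.Str.strip (W ++ pvJoinN cs)] else []) := by
  simp only [pvStepB, if_neg (by simp : ¬ (false : Bool) = true)]
  rw [pvStrip_doc W cs hW]
  split_ifs <;> simp

-- ---- main induction ----

lemma pvMain (ls : List String) : ∀ (W : String) (cs : List String),
    W.toList.all PySem.Chars.isspace = true →
    (∀ c ∈ cs, pvIsSep c = false) →
    pvFinish (ls.foldl pvStepA ([], W ++ pvJoinN cs)) = pvBres (cs ++ ls) := by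
  induction ls with
  | nil =>
    intro W cs hW hall
    simp only [List.foldl_nil, List.append_nil]
    cases cs with
    | nil =>
      simp [pvFinish, pvStrip_doc_nil W hW, pvBres, pvGroups]
    | cons c cs' =>
      have hgr : pvBres (c :: cs') = pvStepB [] (false, c :: cs') := by
        have := pvBres_content c cs' [] (hall c (by simp))
          (fun x hx => hall x (by simp [hx])) (Or.inl rfl)
        simpa [pvBres, pvGroups] using this
      rw [hgr, pvEmit_eq W (c :: cs') hW]
      simp only [pvFinish]
      split_ifs <;> simp
  | cons l ls ih =>
    intro W cs hW hall
    simp only [List.foldl_cons]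
    by_cases h1 : PySem.Str.strip l = "" ∧ PySem.Str.strip (W ++ pvJoinN cs) ≠ ""
    · -- blank separator, nonempty buffer: emit and reset
      have hst : pvStepA ([], W ++ pvJoinN cs) l = ([PySem.Str.strip (W ++ pvJoinN cs)], "") := by
        simp [pvStepA, h1.1, h1.2]
      rw [hst]
      have hfin : pvFinish (ls.foldl pvStepA ([PySem.Str.strip (W ++ pvJoinN cs)], ""))
          = [PySem.Str.strip (W ++ pvJoinN cs)] ++ pvFinish (ls.foldl pvStepA ([], "")) := by
        simpa using pvFinish_acc ls [PySem.Str.strip (W ++ pvJoinN cs)] ""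
      rw [hfin]
      have hIH : pvFinish (ls.foldl pvStepA ([], "")) = pvBres ls := by
        have h0 := ih "" [] (by simp) (by simp)
        have hj : pvJoinN ([] : List String) = "" := rfl
        simpa [hj, pvStr_append_empty] using h0
      rw [hIH]
      -- B side
      have hsep : pvIsSep l = true := by simp [pvIsSep, h1.1]
      obtain ⟨c, cs', rfl⟩ : ∃ c cs', cs = c :: cs' := by
        cases cs with
        | nil => exact absurd (pvStrip_doc_nil W hW) h1.2
        | cons c cs' => exact ⟨c, cs', rfl⟩
      rw [pvBres_content c cs' (l :: ls) (hall c (by simp))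
        (fun x hx => hall x (by simp [hx])) (Or.inr ⟨l, ls, rfl, hsep⟩)]
      rw [pvEmit_eq W (c :: cs') hW, if_pos h1.2, pvBres_sep_cons l ls hsep]
    · by_cases h2 : PySem.Str.isIn "-DOCSTART-" l = true
      · -- DOCSTART separator: emit iff buffer nonempty, reset
        have hst : pvStepA ([], W ++ pvJoinN cs) l
            = ((if PySem.Str.strip (W ++ pvJoinN cs) ≠ "" then [PySem.Str.strip (W ++ pvJoinN cs)] else []), "") := by
          simp only [pvStepA, if_neg h1, if_pos h2]
          split_ifs <;> simp
        rw [hst]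
        rw [pvFinish_acc]
        have hIH : pvFinish (ls.foldl pvStepA ([], "")) = pvBres ls := by
          have h0 := ih "" [] (by simp) (by simp)
          have hj : pvJoinN ([] : List String) = "" := rfl
          simpa [hj, pvStr_append_empty] using h0
        rw [hIH]
        have hsep : pvIsSep l = true := by
          simp only [pvIsSep, h2, Bool.or_true]
        cases cs with
        | nil =>
          rw [if_neg (by simpa using pvStrip_doc_nil W hW)]
          simpa using (pvBres_sep_cons l ls hsep).symm
        | cons c cs' =>
          rw [pvBres_content c cs' (l :: ls) (hall c (by simp))
            (fun x hx => hall x (by simp [hx])) (Or.inr ⟨l, ls, rfl, hsep⟩)]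
          rw [pvEmit_eq W (c :: cs') hW, pvBres_sep_cons l ls hsep]
      · -- else branch: append the line to the buffer
        have hst : pvStepA ([], W ++ pvJoinN cs) l = ([], (W ++ pvJoinN cs) ++ l ++ "\n") := by
          simp only [pvStepA, if_neg h1, if_neg h2]
        rw [hst]
        by_cases hsl : PySem.Str.strip l = ""
        · -- blank line onto a whitespace-only buffer
          have hdoc : PySem.Str.strip (W ++ pvJoinN cs) = "" := by
            by_contra hne
            exact h1 ⟨hsl, hne⟩
          have hcs : cs = [] := pvCs_nil W cs hall hdoc
          subst hcs
          have hlws : l.toList.all PySem.Chars.isspace = true :=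
            pvStrip_eq_nil _ ((pvStrip_str_empty_iff _).mp hsl)
          have hnl : ("\n" : String).toList.all PySem.Chars.isspace = true := by decide
          have hW' : ((W ++ pvJoinN [] ++ l ++ "\n").toList).all PySem.Chars.isspace = true := by
            simp [String.toList_append, List.all_append, pvJoinN_toList, hW, hlws]; decide
          have hIH := ih (W ++ pvJoinN [] ++ l ++ "\n") [] hW' (by simp)
          have hj : pvJoinN ([] : List String) = "" := rfl
          simp only [hj, pvStr_append_empty, List.nil_append] at hIH ⊢
          rw [hIH]
          have hsep : pvIsSep l = true := by simp [pvIsSep, hsl]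
          exact (pvBres_sep_cons l ls hsep).symm
        · -- content line: it joins the run
          have h2f : PySem.Str.isIn "-DOCSTART-" l = false := Bool.eq_false_iff.mpr h2
          have hcontent : pvIsSep l = false := by
            simp only [pvIsSep, h2f, Bool.or_false, beq_eq_false_iff_ne, ne_eq]
            exact hsl
          have hall' : ∀ c ∈ cs ++ [l], pvIsSep c = false := by
            intro c hc
            rcases List.mem_append.mp hc with h | h
            · exact hall c h
            · simp at h; subst h; exact hcontent
          have hIH := ih W (cs ++ [l]) hW hall'
          rw [pvJoinN_append_one] at hIH
          rw [← pvStr_append_assoc, ← pvStr_append_assoc] at hIH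
          rw [hIH]
          simp

-- ===== VERDICT (by name: the statement is the Claim_ definition above) =====
theorem process_conll_data_spec : Claim_equal_process_conll_data := by
  intro dataset _ hPre
  unfold Spec_process_conll_data
  unfold Pre_process_conll_data at hPre
  rw [PySem.Dict.contains_eq_isSome_get?] at hPre
  obtain ⟨lines, hl⟩ := Option.isSome_iff_exists.mp hPre
  unfold process_conll_data process_conll_data_alt
  rw [hl]
  simp only [List.cons.injEq, Prod.mk.injEq, and_true, true_and]
  have := pvMain lines "" [] (by simp) (by simp)
  simpa [pvFinish, pvBres, pvJoinN, pvStr_append_empty] using this
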